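-- pv_equiv track=rewrite | github.com/AdamZhouSE/pythonHomework | Code/CodeRecords/2862/60693/265767.py | del_elements
-- ===== SOURCE A (Python) =====
-- def del_elements(arr):
--     odd_num,even_num=[],[]
--     for x in arr:
--         if x%2:odd_num.append(x)
--         else:even_num.append(x)
--     res=0
--     if abs(len(odd_num)-len(even_num))<=1:return 0
--     if len(odd_num)>len(even_num):
--         odd_num.sort()
--         for i in range(len(odd_num)-len(even_num)-1):
--             res+=odd_num[i]
--     elif len(even_num)>len(odd_num):
--         even_num.sort()
--         for i in range(len(even_num)-len(odd_num)-1):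
--             res+=even_num[i]
--     return res
-- ===== SOURCE B (Python) =====
-- def sum_k_smallest(xs, k):
--     # iterative quickselect: sum of the k smallest elements of xs (0 <= k <= len(xs))
--     res = 0
--     while k > 0:
--         pivot = xs[0]
--         lo = [x for x in xs if x < pivot]
--         eq = [x for x in xs if x == pivot]
--         hi = [x for x in xs if x > pivot]
--         if k <= len(lo):
--             xs = lo
--         elif k <= len(lo) + len(eq):
--             return res + sum(lo) + pivot * (k - len(lo))
--         else:
--             res += sum(lo) + sum(eq)
--             k -= len(lo) + len(eq)
--             xs = hi
--     return res
--
--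
-- def del_elements(arr):
--     odds = [x for x in arr if x % 2]
--     evens = [x for x in arr if x % 2 == 0]
--     if len(odds) > len(evens) + 1:
--         return sum_k_smallest(odds, len(odds) - len(evens) - 1)
--     if len(evens) > len(odds) + 1:
--         return sum_k_smallest(evens, len(evens) - len(odds) - 1)
--     return 0
-- ===== Notes on version B (the rewrite author's own statement) =====
-- stated objective: alternative
-- what changed: Replaces A's full sort of the larger parity group followed by an indexed prefix-sum loop with an iterative quickselect that partitions around a pivot and sums the k smallest elements without sorting.
import Mathlib
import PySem

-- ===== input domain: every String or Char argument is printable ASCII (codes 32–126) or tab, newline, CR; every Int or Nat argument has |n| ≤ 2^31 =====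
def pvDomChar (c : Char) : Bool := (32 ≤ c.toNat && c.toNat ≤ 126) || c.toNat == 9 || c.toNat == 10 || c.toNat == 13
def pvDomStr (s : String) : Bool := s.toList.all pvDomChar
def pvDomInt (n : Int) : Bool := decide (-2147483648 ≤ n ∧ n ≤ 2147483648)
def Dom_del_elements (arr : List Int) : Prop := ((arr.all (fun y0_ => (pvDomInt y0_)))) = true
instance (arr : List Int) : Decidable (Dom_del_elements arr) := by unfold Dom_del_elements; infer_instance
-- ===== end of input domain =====

-- B replaces A's sort-then-prefix-sum with an iterative quickselect that sums the k smallest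
-- elements of the larger parity group without fully sorting it (objective: alternative algorithm).

-- ===== PORT A =====
def del_elements (arr : List Int) : Int :=
  let pr := arr.foldl (fun (s : List Int × List Int) x =>
      if PySem.Int.mod x 2 ≠ 0 then (s.1 ++ [x], s.2) else (s.1, s.2 ++ [x])) ([], [])
  let odd_num := pr.1
  let even_num := pr.2
  if ((odd_num.length : Int) - (even_num.length : Int)).natAbs ≤ 1 then 0
  else if odd_num.length > even_num.length then
    let s := PySem.List.sorted odd_num (fun x => x) false
    (PySem.List.pyRange 0 ((odd_num.length : Int) - (even_num.length : Int) - 1) 1).foldl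
      (fun res i => res + PySem.List.pyGetD s i 0) 0
  else if even_num.length > odd_num.length then
    let s := PySem.List.sorted even_num (fun x => x) false
    (PySem.List.pyRange 0 ((even_num.length : Int) - (odd_num.length : Int) - 1) 1).foldl
      (fun res i => res + PySem.List.pyGetD s i 0) 0
  else 0

-- ===== PORT B =====
-- the `while k > 0` quickselect loop of Source B's sum_k_smallest, as recursion on (xs, k, res);
-- on the unreachable call xs = [] with k > 0 (where Python would raise IndexError) it returns res
def sumKSmallest : List Int → Int → Int → Int
  | xs, k, res =>
    if k ≤ 0 then res
    else
      match xs with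
      | [] => res
      | p :: t =>
        let lo := (p :: t).filter (fun x => decide (x < p))
        let eq := (p :: t).filter (fun x => decide (x = p))
        let hi := (p :: t).filter (fun x => decide (p < x))
        if k ≤ (lo.length : Int) then sumKSmallest lo k res
        else if k ≤ (lo.length : Int) + (eq.length : Int) then
          res + lo.sum + p * (k - (lo.length : Int))
        else sumKSmallest hi (k - (lo.length : Int) - (eq.length : Int)) (res + lo.sum + eq.sum)
  termination_by xs _ _ => xs.length
  decreasing_by
  · simp only [List.filter_cons, decide_eq_true_eq, lt_self_iff_false, if_false, List.length_cons]
    exact Nat.lt_succ_of_le (List.length_filter_le _ _)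
  · simp only [List.filter_cons, decide_eq_true_eq, lt_self_iff_false, if_false, List.length_cons]
    exact Nat.lt_succ_of_le (List.length_filter_le _ _)

def del_elements_alt (arr : List Int) : Int :=
  let odds := arr.filter (fun x => decide (PySem.Int.mod x 2 ≠ 0))
  let evens := arr.filter (fun x => decide (PySem.Int.mod x 2 = 0))
  if odds.length > evens.length + 1 then
    sumKSmallest odds ((odds.length : Int) - (evens.length : Int) - 1) 0
  else if evens.length > odds.length + 1 then
    sumKSmallest evens ((evens.length : Int) - (odds.length : Int) - 1) 0
  else 0

-- ===== PRECONDITION & SPEC =====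
def Spec_del_elements (arr : List Int) (out : Int) : Prop := out = del_elements_alt arr
instance (arr : List Int) (out : Int) : Decidable (Spec_del_elements arr out) := by unfold Spec_del_elements; infer_instance

-- ===== CLAIM (what is proved, stated in full; the proofs are below) =====
def Claim_equal_del_elements : Prop := ∀ (arr : List Int), Dom_del_elements arr → Spec_del_elements arr (del_elements arr)

-- ===== LEMMAS AND PROOFS =====

-- A's pair-building loop is the two parity filters
theorem pv_fold_partition (arr : List Int) (o e : List Int) :
    arr.foldl (fun (s : List Int × List Int) x =>
      if PySem.Int.mod x 2 ≠ 0 then (s.1 ++ [x], s.2) else (s.1, s.2 ++ [x])) (o, e)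
    = (o ++ arr.filter (fun x => decide (PySem.Int.mod x 2 ≠ 0)),
       e ++ arr.filter (fun x => decide (PySem.Int.mod x 2 = 0))) := by
  induction arr generalizing o e with
  | nil => simp
  | cons x t ih =>
    simp only [List.foldl_cons, List.filter_cons]
    by_cases h : PySem.Int.mod x 2 = 0
    · rw [if_neg (not_not_intro h),
        if_neg (by simp only [decide_eq_true_eq, ne_eq]; exact not_not_intro h),
        if_pos (by simp only [decide_eq_true_eq]; exact h), ih]
      simp
    · rw [if_pos h,
        if_pos (by simp only [decide_eq_true_eq, ne_eq]; exact h),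
        if_neg (by simp only [decide_eq_true_eq]; exact h), ih]
      simp

-- sorted(xs) splits at any pivot p into sorted(<p) ++ (=p) ++ sorted(>p)
theorem pv_sorted_partition (xs : List Int) (p : Int) :
    PySem.List.sorted xs (fun x => x) false
      = PySem.List.sorted (xs.filter (fun x => decide (x < p))) (fun x => x) false
        ++ xs.filter (fun x => decide (x = p))
        ++ PySem.List.sorted (xs.filter (fun x => decide (p < x))) (fun x => x) false := by
  have mlo : ∀ x ∈ PySem.List.sorted (xs.filter (fun x => decide (x < p))) (fun x => x) false, x < p := by
    intro x hx
    have := (PySem.List.mem_sorted _ _ _ _).mp hx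
    simpa using (List.mem_filter.mp this).2
  have meq : ∀ x ∈ xs.filter (fun x => decide (x = p)), x = p := by
    intro x hx; simpa using (List.mem_filter.mp hx).2
  have mhi : ∀ x ∈ PySem.List.sorted (xs.filter (fun x => decide (p < x))) (fun x => x) false, p < x := by
    intro x hx
    have := (PySem.List.mem_sorted _ _ _ _).mp hx
    simpa using (List.mem_filter.mp this).2
  apply PySem.List.sorted_id_eq_of_perm_of_pairwise
  · have h1 := PySem.List.sorted_perm (xs.filter (fun x => decide (x < p))) (fun x : Int => x) false
    have h3 := PySem.List.sorted_perm (xs.filter (fun x => decide (p < x))) (fun x : Int => x) false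
    refine ((h1.append (List.Perm.refl _)).append h3).trans ?_
    rw [List.perm_iff_count]
    intro a
    have hzero : ∀ (q : Int → Bool), q a = false → List.count a (xs.filter q) = 0 :=
      fun q hq => List.count_eq_zero.mpr (fun hm => by
        have := (List.mem_filter.mp hm).2; rw [hq] at this; exact Bool.false_ne_true this)
    simp only [List.count_append]
    rcases lt_trichotomy a p with h | h | h
    · rw [List.count_filter (by simpa using h), hzero _ (by simpa using h.ne),
        hzero _ (by simpa using not_lt_of_gt h)]
      omega
    · rw [hzero _ (by simp [h]), List.count_filter (by simpa using h),
        hzero _ (by simpa using h.le.not_gt)]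
      omega
    · rw [hzero _ (by simpa using h.le.not_gt), hzero _ (by simpa using h.ne'),
        List.count_filter (by simpa using h)]
      omega
  · rw [List.append_assoc, List.pairwise_append, List.pairwise_append]
    refine ⟨PySem.List.sorted_pairwise _ _, ⟨?_, PySem.List.sorted_pairwise _ _, ?_⟩, ?_⟩
    · exact List.pairwise_of_forall_mem_list (fun a ha b hb => by rw [meq a ha, meq b hb])
    · intro a ha b hb
      exact le_of_lt (by rw [meq a ha]; exact mhi b hb)
    · intro a ha b hb
      rcases List.mem_append.mp hb with hb | hb
      · rw [meq b hb]; exact le_of_lt (mlo a ha)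
      · exact le_of_lt ((mlo a ha).trans (mhi b hb))

-- a prefix of a constant-p list sums to p times its length
theorem pv_take_const_sum (p : Int) : ∀ (E : List Int) (m : Nat), (∀ x ∈ E, x = p) → m ≤ E.length →
    (E.take m).sum = p * m := by
  intro E
  induction E with
  | nil => intro m _ hm; simp at hm; subst hm; simp
  | cons x t ih =>
    intro m hall hm
    cases m with
    | zero => simp
    | succ m =>
      rw [List.take_succ_cons, List.sum_cons, hall x (by simp), ih m (fun y hy => hall y (by simp [hy])) (by simpa using hm)]
      push_cast; ring

-- the quickselect loop computes res plus the sum of the k smallest elements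
theorem pv_qsel_eq : ∀ (n : Nat) (xs : List Int), xs.length ≤ n → ∀ (k res : Int),
    sumKSmallest xs k res = res + ((PySem.List.sorted xs (fun x => x) false).take k.toNat).sum := by
  intro n
  induction n with
  | zero =>
    intro xs hlen k res
    have : xs = [] := List.length_eq_zero_iff.mp (Nat.le_zero.mp hlen)
    subst this
    rw [sumKSmallest.eq_def]
    simp [PySem.List.sorted]
  | succ n ih =>
    intro xs hlen k res
    rw [sumKSmallest.eq_def]
    by_cases hk : k ≤ 0
    · simp [hk, Int.toNat_of_nonpos hk]
    · simp only [hk, if_false]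
      match xs with
      | [] => simp [PySem.List.sorted]
      | p :: t =>
        simp only []
        set L := (p :: t).filter (fun x => decide (x < p)) with hL
        set E := (p :: t).filter (fun x => decide (x = p)) with hE
        set H := (p :: t).filter (fun x => decide (p < x)) with hH
        have hLlen : L.length ≤ t.length := by
          rw [hL, List.filter_cons]; simp [List.length_filter_le]
        have hHlen : H.length ≤ t.length := by
          rw [hH, List.filter_cons]; simp [List.length_filter_le]
        have hEp : ∀ x ∈ E, x = p := fun x hx => by simpa using (List.mem_filter.mp hx).2
        have hsp := pv_sorted_partition (p :: t) p
        rw [← hL, ← hE, ← hH] at hsp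
        have hSL : (PySem.List.sorted L (fun x => x) false).length = L.length :=
          PySem.List.length_sorted _ _ _
        have hSLsum : (PySem.List.sorted L (fun x => x) false).sum = L.sum :=
          (PySem.List.sorted_perm _ _ _).sum_eq
        have hlen' : t.length ≤ n := by simpa using hlen
        split_ifs with h1 h2
        · -- k ≤ |L|
          rw [ih L (le_trans hLlen hlen') k res, hsp,
            List.take_append_of_le_length (by simp only [List.length_append]; omega),
            List.take_append_of_le_length (by omega)]
        · -- |L| < k ≤ |L| + |E|
          rw [hsp, List.append_assoc, List.take_append,
            List.take_of_length_le (by rw [hSL]; omega), List.take_append]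
          have hz : k.toNat - (PySem.List.sorted L (fun x => x) false).length - E.length = 0 := by
            rw [hSL]; omega
          rw [hz, List.take_zero, List.append_nil, List.sum_append, hSLsum,
            pv_take_const_sum p E _ hEp (by omega)]
          have hcast : ((k.toNat - (PySem.List.sorted L (fun x => x) false).length : Nat) : Int)
              = k - (L.length : Int) := by omega
          rw [hcast]; ring
        · -- k > |L| + |E|
          rw [hsp, List.append_assoc, List.take_append,
            List.take_of_length_le (by rw [hSL]; omega), List.take_append,
            List.take_of_length_le (by rw [hSL]; omega), ih H (le_trans hHlen hlen') _ _]
          rw [List.sum_append, List.sum_append, hSLsum]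
          have harg : (k - (L.length:Int) - (E.length:Int)).toNat
              = k.toNat - (PySem.List.sorted L (fun x => x) false).length - E.length := by omega
          rw [harg]; ring

-- A's indexed summation loop over range(n) is the prefix sum of the first n elements
theorem pv_range_sum (s : List Int) : ∀ (m : Nat), m ≤ s.length →
    (PySem.List.pyRange 0 (m : Int) 1).foldl (fun res i => res + PySem.List.pyGetD s i 0) 0
      = (s.take m).sum := by
  intro m
  induction m with
  | zero => simp [PySem.List.pyRange_one_eq_nil]
  | succ m ih =>
    intro h
    have hcast : ((m + 1 : Nat) : Int) = (m : Int) + 1 := by push_cast; ring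
    rw [hcast, PySem.List.pyRange_one_succ_right (by exact_mod_cast Nat.zero_le m),
      List.foldl_append, ih (by omega)]
    simp only [List.foldl_cons, List.foldl_nil]
    rw [List.take_add_one, List.getElem?_eq_getElem (by omega : m < s.length), List.sum_append]
    simp [PySem.List.pyGetD_natCast, List.getD_eq_getElem?_getD,
      List.getElem?_eq_getElem (by omega : m < s.length)]

-- ===== VERDICT (by name: the statement is the Claim_ definition above) =====
theorem del_elements_spec : Claim_equal_del_elements := by
  intro arr _
  unfold Spec_del_elements del_elements del_elements_alt
  rw [pv_fold_partition arr [] []]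
  simp only [List.nil_append]
  set O := arr.filter (fun x => decide (PySem.Int.mod x 2 ≠ 0)) with hO
  set Ev := arr.filter (fun x => decide (PySem.Int.mod x 2 = 0)) with hEv
  by_cases h1 : ((O.length : Int) - (Ev.length : Int)).natAbs ≤ 1
  · rw [if_pos h1, if_neg (by omega), if_neg (by omega)]
  · rw [if_neg h1]
    by_cases h2 : O.length > Ev.length
    · rw [if_pos h2, if_pos (by omega)]
      have hm : ((O.length - Ev.length - 1 : Nat) : Int) = (O.length : Int) - Ev.length - 1 := by
        omega
      have hS : (PySem.List.sorted O (fun x => x) false).length = O.length :=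
        PySem.List.length_sorted _ _ _
      rw [pv_qsel_eq O.length O le_rfl ((O.length : Int) - (Ev.length : Int) - 1) 0, zero_add,
        ← hm, Int.toNat_natCast, pv_range_sum _ _ (by rw [hS]; omega)]
    · rw [if_neg h2, if_pos (by omega), if_neg (by omega), if_pos (by omega)]
      have hm : ((Ev.length - O.length - 1 : Nat) : Int) = (Ev.length : Int) - O.length - 1 := by
        omega
      have hS : (PySem.List.sorted Ev (fun x => x) false).length = Ev.length :=
        PySem.List.length_sorted _ _ _
      rw [pv_qsel_eq Ev.length Ev le_rfl ((Ev.length : Int) - (O.length : Int) - 1) 0, zero_add,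
        ← hm, Int.toNat_natCast, pv_range_sum _ _ (by rw [hS]; omega)]
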